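-- pv_equiv track=rewrite | github.com/emuhich/auto_reg_betere | main.py | generate_list
-- ===== SOURCE A (Python) =====
-- def generate_list(count):
--     data = []
--     a = count // 2
--     for i in range(0, a):
--         data.append('2')
--     b = count % 2
--     if b > 0:
--         data.append('1')
--     return data
-- ===== SOURCE B (Python) =====
-- def generate_list(count):
--     # Divide-and-conquer: build the block of '2's by recursive list doubling
--     # (log-depth), then attach the optional '1' from the parity of count.
--     def twos(k):
--         if k <= 0:
--             return []
--         half = twos(k // 2)
--         return half + half + (['2'] if k % 2 else [])
--     return twos(count // 2) + (['1'] if count % 2 else [])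
-- ===== Notes on version B (the rewrite author's own statement) =====
-- stated objective: alternative
-- what changed: Builds the repeated middle block by logarithmic-depth recursive list doubling on half of count instead of A's element-by-element append loop; the optional trailing singleton comes from the parity of count.
import Mathlib
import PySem

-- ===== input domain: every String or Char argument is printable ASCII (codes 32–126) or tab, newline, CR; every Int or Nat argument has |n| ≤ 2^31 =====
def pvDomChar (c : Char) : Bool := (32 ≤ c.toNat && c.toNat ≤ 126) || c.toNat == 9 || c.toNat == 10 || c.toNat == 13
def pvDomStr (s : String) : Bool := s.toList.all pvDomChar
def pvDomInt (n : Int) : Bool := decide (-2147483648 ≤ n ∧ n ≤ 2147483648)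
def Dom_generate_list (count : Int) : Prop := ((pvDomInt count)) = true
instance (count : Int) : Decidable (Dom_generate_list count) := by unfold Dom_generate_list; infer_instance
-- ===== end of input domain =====

-- B builds the repeated block by logarithmic-depth recursive list doubling on half of count instead of A's per-element append loop (objective: alternative).


-- ===== PORT A =====
def generate_list (count : Int) : List String :=
  let data : List String := []
  let a := PySem.Int.floordiv count 2
  let data := (PySem.List.pyRange 0 a 1).foldl (fun acc _ => acc ++ ["2"]) data
  let b := PySem.Int.mod count 2
  if b > 0 then data ++ ["1"] else data

-- ===== PORT B =====
-- helper: the inner 'twos' of Source B — recursive list doubling on half of k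
def pvTwos (k : Int) : List String :=
  if k ≤ 0 then []
  else
    let half := pvTwos (PySem.Int.floordiv k 2)
    half ++ half ++ (if PySem.Int.mod k 2 ≠ 0 then ["2"] else [])
termination_by k.toNat
decreasing_by
  rename_i h
  rw [PySem.Int.floordiv_eq_ediv_of_pos (by omega)]; omega

def generate_list_alt (count : Int) : List String :=
  pvTwos (PySem.Int.floordiv count 2) ++ (if PySem.Int.mod count 2 ≠ 0 then ["1"] else [])

-- ===== PRECONDITION & SPEC =====
def Spec_generate_list (count : Int) (out : List String) : Prop := out = generate_list_alt count
instance (count : Int) (out : List String) : Decidable (Spec_generate_list count out) := by unfold Spec_generate_list; infer_instance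

-- ===== CLAIM (what is proved, stated in full; the proofs are below) =====
def Claim_equal_generate_list : Prop := ∀ (count : Int), Dom_generate_list count → Spec_generate_list count (generate_list count)

-- ===== LEMMAS AND PROOFS =====

-- A fold that appends one element per iteration, started from acc, yields acc ++ replicate (length) of it.
theorem foldl_append_const {α β : Type} (l : List α) (x : β) (acc : List β) :
    l.foldl (fun acc _ => acc ++ [x]) acc = acc ++ List.replicate l.length x := by
  induction l generalizing acc with
  | nil => simp
  | cons h t ih => simp [List.foldl, ih, List.replicate_succ, List.append_assoc]

-- The doubling recursion produces exactly k.toNat copies of "2".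
theorem pvTwos_eq_replicate (k : Int) : pvTwos k = List.replicate k.toNat "2" := by
  rw [pvTwos]
  split
  · next h => simp [Int.toNat_of_nonpos h]
  · next h =>
    simp only
    rw [pvTwos_eq_replicate (PySem.Int.floordiv k 2)]
    rw [PySem.Int.floordiv_eq_ediv_of_pos (by omega),
        PySem.Int.mod_eq_emod_of_pos (by omega)]
    rcases Int.emod_two_eq k with h2 | h2
    · rw [h2]
      simp only [ne_eq, not_true_eq_false, if_false, List.append_nil,
        ← List.replicate_add]
      congr 1
      omega
    · rw [h2]
      simp only [ne_eq, one_ne_zero, not_false_eq_true, if_true,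
        show (["2"] : List String) = List.replicate 1 "2" from rfl,
        ← List.replicate_add]
      congr 1
      omega
termination_by k.toNat

-- ===== VERDICT (by name: the statement is the Claim_ definition above) =====
theorem generate_list_spec : Claim_equal_generate_list := by
  intro count _
  show generate_list count = generate_list_alt count
  rw [generate_list, generate_list_alt, pvTwos_eq_replicate, foldl_append_const,
      PySem.List.length_pyRange_one]
  rw [PySem.Int.mod_eq_emod_of_pos (by omega : (0:Int) < 2)]
  rcases Int.emod_two_eq count with h | h <;> simp [h]
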